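-- pv_equiv track=rewrite | github.com/Eduardo-Acuna/Proyecto_algoritmo2_2023 | Trabajo_Practico/Funcion_Circunf2.py | aux_operando_x
-- ===== SOURCE A (Python) =====
-- def aux_operando_x(cadena):
--     constante = ''
--
--     # Itera a través de los caracteres de la cadena
--     EXISTE_VARIABLE = False
--     for caracter in cadena:
--         if caracter in 'x':
--
--             EXISTE_VARIABLE = True
--             break
--             # Si se encuentra un signo, se detiene la extracción
--
--         elif caracter in '0123456789':
--             constante += caracter
--
--     # Si no se encontró ninguna constante, establece un valor predeterminado
--     if EXISTE_VARIABLE and not constante: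
--         constante = '1'
--
--     return int(constante)
-- ===== SOURCE B (Python) =====
-- def aux_operando_x(cadena):
--     # Right-to-left scan, building the digit string back-to-front: meeting an
--     # 'x' discards everything gathered so far (it all lay after that 'x'), so
--     # at the end only the digits before the FIRST 'x' remain.
--     existe = False
--     digits = ''
--     for c in reversed(cadena):
--         if c == 'x':
--             existe = True
--             digits = ''
--         elif c.isdigit():
--             digits = c + digits
--     if existe and not digits:
--         digits = '1'
--     return int(digits)
-- ===== Notes on version B (the rewrite author's own statement) =====
-- stated objective: alternative
-- what changed: Replaces A's left-to-right scan that breaks at the first 'x' by a right-to-left scan over the whole string that builds the digit string back-to-front and resets it whenever an 'x' is met, so only digits before the first 'x' survive.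
import Mathlib
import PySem

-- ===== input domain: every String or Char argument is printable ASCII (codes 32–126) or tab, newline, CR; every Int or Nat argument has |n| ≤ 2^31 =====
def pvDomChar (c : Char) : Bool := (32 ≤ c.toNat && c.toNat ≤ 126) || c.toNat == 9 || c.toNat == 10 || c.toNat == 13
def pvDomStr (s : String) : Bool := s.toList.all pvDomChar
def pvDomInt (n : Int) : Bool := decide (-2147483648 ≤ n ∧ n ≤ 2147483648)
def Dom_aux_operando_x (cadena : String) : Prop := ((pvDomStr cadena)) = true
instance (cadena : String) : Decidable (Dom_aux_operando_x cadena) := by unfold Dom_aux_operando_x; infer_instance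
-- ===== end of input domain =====

-- B replaces A's left-to-right scan that breaks at the first 'x' by a right-to-left scan of the
-- whole string that builds the digit string back-to-front, resetting it at each 'x'; same value.

-- ===== PORT A =====
-- the for-loop with break: walks the characters carrying constante; snd = EXISTE_VARIABLE
def pvLoopA : List Char → List Char → (List Char × Bool)
  | [], constante => (constante, false)
  | c :: cs, constante =>
    if c = 'x' then (constante, true)
    else if ("0123456789".toList).contains c then pvLoopA cs (constante ++ [c])
    else pvLoopA cs constante

def aux_operando_x (cadena : String) : Int :=
  let r := pvLoopA cadena.toList []
  let constante := if r.2 && r.1.isEmpty then ['1'] else r.1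
  (PySem.Int.ofChars? constante).getD 0   -- int(constante); Pre_ excludes the ValueError case

-- ===== PORT B =====
-- one step of B's loop body: state = (digits, existe)
def pvStepB (c : Char) (st : List Char × Bool) : List Char × Bool :=
  if c = 'x' then ([], true)
  else if PySem.Chars.isdigit c then (c :: st.1, st.2)
  else st

def aux_operando_x_alt (cadena : String) : Int :=
  -- 'for c in reversed(cadena)': a left fold over the reversed character list
  let r := cadena.toList.reverse.foldl (fun st c => pvStepB c st) ([], false)
  let digits := if r.2 && r.1.isEmpty then ['1'] else r.1
  (PySem.Int.ofChars? digits).getD 0   -- int(digits); Pre_ excludes the ValueError case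

-- ===== PRECONDITION & SPEC =====
-- Pre_ excludes exactly the inputs where both programs raise ValueError in int(''):
-- strings containing no 'x' and no digit character.
def Pre_aux_operando_x (cadena : String) : Prop :=
  cadena.toList.any (fun c => c == 'x' || PySem.Chars.isdigit c) = true
instance (cadena : String) : Decidable (Pre_aux_operando_x cadena) := by
  unfold Pre_aux_operando_x; infer_instance

def pvWitness_aux_operando_x : String := "23x"

def Spec_aux_operando_x (cadena : String) (out : Int) : Prop := out = aux_operando_x_alt cadena
instance (cadena : String) (out : Int) : Decidable (Spec_aux_operando_x cadena out) := by unfold Spec_aux_operando_x; infer_instance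

-- ===== CLAIM (what is proved, stated in full; the proofs are below) =====
def Claim_equal_aux_operando_x : Prop := ∀ (cadena : String), Dom_aux_operando_x cadena → Pre_aux_operando_x cadena → Spec_aux_operando_x cadena (aux_operando_x cadena)

-- ===== LEMMAS AND PROOFS =====

-- membership in '0123456789' is exactly the isdigit test
theorem pv_digit_contains (c : Char) :
    ("0123456789".toList).contains c = PySem.Chars.isdigit c := by
  rw [Bool.eq_iff_iff]
  simp only [show ("0123456789".toList) = ['0','1','2','3','4','5','6','7','8','9'] from rfl,
    List.contains_eq_mem, decide_eq_true_eq, List.mem_cons, List.not_mem_nil, or_false,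
    PySem.Chars.isdigit, Bool.and_eq_true, decide_eq_true_eq]
  constructor
  · rintro (rfl|rfl|rfl|rfl|rfl|rfl|rfl|rfl|rfl|rfl) <;> exact ⟨by decide, by decide⟩
  · rintro ⟨h1, h2⟩
    have hl : ('0' : Char).toNat ≤ c.toNat := by
      exact UInt32.le_iff_toNat_le.mp (Char.le_def.mp h1)
    have hr : c.toNat ≤ ('9' : Char).toNat := by
      exact UInt32.le_iff_toNat_le.mp (Char.le_def.mp h2)
    have e0 : ('0' : Char).toNat = 48 := rfl
    have e9 : ('9' : Char).toNat = 57 := rfl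
    rw [e0] at hl
    rw [e9] at hr
    have hn : c.toNat = 48 ∨ c.toNat = 49 ∨ c.toNat = 50 ∨ c.toNat = 51 ∨ c.toNat = 52 ∨
        c.toNat = 53 ∨ c.toNat = 54 ∨ c.toNat = 55 ∨ c.toNat = 56 ∨ c.toNat = 57 := by
      omega
    have key : ∀ (d : Char), c.toNat = d.toNat → c = d := by
      intro d h
      have := congrArg Char.ofNat h
      rwa [Char.ofNat_toNat, Char.ofNat_toNat] at this
    rcases hn with h|h|h|h|h|h|h|h|h|h
    · exact Or.inl (key '0' h)
    · exact Or.inr (Or.inl (key '1' h))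
    · exact Or.inr (Or.inr (Or.inl (key '2' h)))
    · exact Or.inr (Or.inr (Or.inr (Or.inl (key '3' h))))
    · exact Or.inr (Or.inr (Or.inr (Or.inr (Or.inl (key '4' h)))))
    · exact Or.inr (Or.inr (Or.inr (Or.inr (Or.inr (Or.inl (key '5' h))))))
    · exact Or.inr (Or.inr (Or.inr (Or.inr (Or.inr (Or.inr (Or.inl (key '6' h)))))))
    · exact Or.inr (Or.inr (Or.inr (Or.inr (Or.inr (Or.inr (Or.inr (Or.inl (key '7' h))))))))
    · exact Or.inr (Or.inr (Or.inr (Or.inr (Or.inr (Or.inr (Or.inr (Or.inr (Or.inl (key '8' h)))))))))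
    · exact Or.inr (Or.inr (Or.inr (Or.inr (Or.inr (Or.inr (Or.inr (Or.inr (Or.inr (key '9' h)))))))))

-- loop invariant for A: the loop appends the digits of the pre-'x' prefix; the flag says 'x' occurs
theorem pvLoopA_eq (l acc : List Char) :
    pvLoopA l acc =
      (acc ++ (l.takeWhile (fun c => !(c == 'x'))).filter PySem.Chars.isdigit,
       l.contains 'x') := by
  induction l generalizing acc with
  | nil => simp [pvLoopA]
  | cons c cs ih =>
    rw [pvLoopA]
    by_cases hx : c = 'x'
    · subst hx; simp
    · have hxb : (c == 'x') = false := by simp [hx]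
      rw [pv_digit_contains]
      by_cases hd : PySem.Chars.isdigit c
      · rw [if_neg hx]
        simp [hd, ih, hxb, Ne.symm hx]
      · rw [if_neg hx]
        simp [hd, ih, hxb, Ne.symm hx]

-- B's right-to-left loop is the right fold; the reset at 'x' makes it compute the same pair
theorem pvFoldB_eq (l : List Char) :
    l.foldr pvStepB ([], false) =
      ((l.takeWhile (fun c => !(c == 'x'))).filter PySem.Chars.isdigit,
       l.contains 'x') := by
  induction l with
  | nil => simp
  | cons c cs ih =>
    simp only [List.foldr_cons, ih]
    unfold pvStepB
    by_cases hx : c = 'x'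
    · subst hx; simp
    · have hxb : (c == 'x') = false := by simp [hx]
      by_cases hd : PySem.Chars.isdigit c
      · simp [hx, hd, hxb, Ne.symm hx]
      · simp [hx, hd, hxb, Ne.symm hx]

-- ===== VERDICT (by name: the statement is the Claim_ definition above) =====
theorem aux_operando_x_spec : Claim_equal_aux_operando_x := by
  intro cadena _ _
  unfold Spec_aux_operando_x aux_operando_x aux_operando_x_alt
  rw [pvLoopA_eq, List.foldl_reverse, pvFoldB_eq]
  simp
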